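-- pv_equiv track=rewrite | github.com/boomertechnodev/latent_trajectory_transformer | 01_hilbert_curve_mapper/hilbert_mapper.py | _hilbert_index_to_xy
-- ===== SOURCE A (Python) =====
-- from typing import Tuple
--
-- def _hilbert_index_to_xy(index: int, order: int) -> Tuple[int, int]:
--     """
--     Convert Hilbert curve index to (x, y) coordinates using bit manipulation.
--
--     Based on corrected algorithm for Hilbert curve generation.
--
--     Args:
--         index: 1D position along the Hilbert curve (0 to 2^(2*order) - 1)
--         order: Order of the Hilbert curve
--
--     Returns:
--         Tuple of (x, y) coordinates in grid space [0, 2^order - 1]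
--
--     Algorithm:
--         The Hilbert curve is built recursively. At each level, we extract
--         2 bits to determine which quadrant, apply appropriate rotations,
--         then accumulate offsets.
--     """
--     x = y = 0
--     s = 1  # side length of current square
--
--     for _ in range(order):
--         # Extract 2 bits: determines which quadrant (0, 1, 2, or 3)
--         rx = 1 & (index >> 1)
--         ry = 1 & (index ^ rx)
--
--         # Apply rotation for this quadrant
--         if ry == 0:
--             if rx == 1:
--                 # Reflect vertically and horizontally
--                 x = s - 1 - x
--                 y = s - 1 - y
--             # Swap x and y
--             x, y = y, x
--
--         # Add offset for this quadrant
--         x += s * rx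
--         y += s * ry
--
--         # Move to next level (square size doubles)
--         index >>= 2
--         s *= 2
--
--     return x, y
-- ===== SOURCE B (Python) =====
-- from typing import Tuple
--
-- def _hilbert_index_to_xy(index: int, order: int) -> Tuple[int, int]:
--     """MSB-first walk over the bit pairs: instead of repeatedly rotating the
--     accumulated coordinates (as the LSB-first loop does), keep the current
--     frame orientation as two flags (swap, neg), map each quadrant's offset
--     through that orientation once, and compose the orientation as we descend."""
--     x = y = 0            # accumulated offset in the global frame
--     swap = False         # current orientation: transpose?
--     neg = False          # current orientation: point-reflect?
--     for level in range(order - 1, -1, -1):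
--         s = 1 << level
--         rx = 1 & (index >> (2 * level + 1))
--         ry = 1 & ((index >> (2 * level)) ^ rx)
--         # this quadrant's affine step in the local frame: v -> M*v + (ox, oy)
--         if ry == 1:
--             ox, oy = s * rx, s          # M = identity
--         elif rx == 1:
--             ox, oy = 2 * s - 1, s - 1   # M = minus-transpose
--         else:
--             ox, oy = 0, 0               # M = transpose
--         # map the offset through the orientation accumulated so far
--         if swap:
--             ox, oy = oy, ox
--         if neg:
--             ox, oy = -ox, -oy
--         x += ox
--         y += oy
--         # compose the orientation with this quadrant's linear part
--         if ry == 0: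
--             swap = not swap
--             neg = neg ^ (rx == 1)
--     return (x, y)
-- ===== Notes on version B (the rewrite author's own statement) =====
-- stated objective: alternative
-- what changed: A walks the index LSB-first, re-rotating/reflecting the accumulated (ever larger) coordinates at every level; B walks MSB-first, keeping the current frame orientation as two booleans (swap, negate), mapping each quadrant's offset through that orientation once and composing orientations as it descends.
import Mathlib
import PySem

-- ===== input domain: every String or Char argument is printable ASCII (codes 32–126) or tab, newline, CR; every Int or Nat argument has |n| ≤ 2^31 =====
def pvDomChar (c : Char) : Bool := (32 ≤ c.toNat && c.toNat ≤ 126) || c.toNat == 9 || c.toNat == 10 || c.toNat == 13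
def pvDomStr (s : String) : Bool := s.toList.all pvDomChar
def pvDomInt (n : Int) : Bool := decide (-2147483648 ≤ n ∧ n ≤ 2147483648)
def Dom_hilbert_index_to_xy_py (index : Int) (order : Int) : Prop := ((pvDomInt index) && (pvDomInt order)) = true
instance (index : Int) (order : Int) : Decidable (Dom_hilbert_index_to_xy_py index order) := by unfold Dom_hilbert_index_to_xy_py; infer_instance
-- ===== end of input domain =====

-- B replaces A's LSB-first loop (which re-rotates the accumulated coordinates at every
-- level) by an MSB-first walk that keeps the current frame orientation as two flags and
-- maps each quadrant offset through it once; same exact values, different decomposition.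

-- ===== PORT A =====
-- A's loop: LSB-first over bit pairs, state (x, y, index, s); index is shifted right
-- and s doubled each iteration, exactly as the Python mutates them.
def pvA_loop (x y index s : Int) : Nat → Int × Int
  | 0 => (x, y)
  | Nat.succ n =>
      let rx := PySem.Int.band 1 (index >>> (1:Nat))
      let ry := PySem.Int.band 1 (PySem.Int.bxor index rx)
      let xy :=
        if ry = 0 then
          let xy := if rx = 1 then (s - 1 - x, s - 1 - y) else (x, y)
          (xy.2, xy.1)
        else (x, y)
      pvA_loop (xy.1 + s * rx) (xy.2 + s * ry) (index >>> (2:Nat)) (s * 2) n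

def hilbert_index_to_xy_py (index : Int) (order : Int) : Int × Int :=
  pvA_loop 0 0 index 1 order.toNat

-- ===== PORT B =====
-- B's loop: MSB-first (level = order-1 … 0, here k+1 remaining levels means
-- level = k); state is the accumulated offset (x, y) plus the orientation flags
-- (swap, neg); index is never mutated.
def pvB_loop (index : Int) (x y : Int) (swap neg : Bool) : Nat → Int × Int
  | 0 => (x, y)
  | Nat.succ k =>
      let s : Int := 1 <<< k
      let rx := PySem.Int.band 1 (index >>> (2 * k + 1))
      let ry := PySem.Int.band 1 (PySem.Int.bxor (index >>> (2 * k)) rx)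
      let o : Int × Int :=
        if ry = 1 then (s * rx, s)
        else if rx = 1 then (2 * s - 1, s - 1)
        else (0, 0)
      let o := if swap then (o.2, o.1) else o
      let o := if neg then (-o.1, -o.2) else o
      pvB_loop index (x + o.1) (y + o.2)
        (if ry = 0 then !swap else swap)
        (if ry = 0 then (neg != (rx == 1)) else neg) k

def hilbert_index_to_xy_py_alt (index : Int) (order : Int) : Int × Int :=
  pvB_loop index 0 0 false false order.toNat

-- ===== PRECONDITION & SPEC =====
def Spec_hilbert_index_to_xy_py (index : Int) (order : Int) (out : Int × Int) : Prop := out = hilbert_index_to_xy_py_alt index order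
instance (index : Int) (order : Int) (out : Int × Int) : Decidable (Spec_hilbert_index_to_xy_py index order out) := by unfold Spec_hilbert_index_to_xy_py; infer_instance

-- ===== CLAIM (what is proved, stated in full; the proofs are below) =====
def Claim_equal_hilbert_index_to_xy_py : Prop := ∀ (index : Int) (order : Int), Dom_hilbert_index_to_xy_py index order → Spec_hilbert_index_to_xy_py index order (hilbert_index_to_xy_py index order)

-- ===== LEMMAS AND PROOFS =====

-- A's loop body, abstracted over the already-extracted bits rx, ry and the side s.
def pvStepRaw (s rx ry : Int) (v : Int × Int) : Int × Int :=
  let w :=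
    if ry = 0 then
      let w := if rx = 1 then (s - 1 - v.1, s - 1 - v.2) else v
      (w.2, w.1)
    else v
  (w.1 + s * rx, w.2 + s * ry)

-- B's orientation flags applied to a vector.
def pvApp (swap neg : Bool) (v : Int × Int) : Int × Int :=
  let v := if swap then (v.2, v.1) else v
  if neg then (-v.1, -v.2) else v

-- '1 & z' is the low bit: 0 or 1.
theorem pv_band_one_cases (z : Int) :
    PySem.Int.band 1 z = 0 ∨ PySem.Int.band 1 z = 1 := by
  rw [PySem.Int.band_comm, PySem.Int.band_one]
  have h1 := PySem.Int.mod_nonneg z (b := 2) (by norm_num)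
  have h2 := PySem.Int.mod_lt z (b := 2) (by norm_num)
  omega

-- peel the LAST iteration of A's loop: the (n+1)-st iteration acts on bit pair
-- (2n, 2n+1) of the original index, with side s * 2^n.
theorem pvA_last (n : Nat) : ∀ (x y i s : Int),
    pvA_loop x y i s (n + 1) =
      pvStepRaw (s * 2 ^ n)
        (PySem.Int.band 1 (i >>> (2 * n + 1)))
        (PySem.Int.band 1 (PySem.Int.bxor (i >>> (2 * n)) (PySem.Int.band 1 (i >>> (2 * n + 1)))))
        (pvA_loop x y i s n) := by
  induction n with
  | zero =>
    intro x y i s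
    simp [pvA_loop, pvStepRaw]
  | succ n ih =>
    intro x y i s
    conv_lhs => rw [pvA_loop]
    rw [ih]
    conv_rhs => rw [pvA_loop]
    have h1 : i >>> (2:Nat) >>> (2 * n + 1) = i >>> (2 * (n + 1) + 1) := by
      rw [(Int.shiftRight_add i 2 (2*n+1)).symm]; congr 1; omega
    have h2 : i >>> (2:Nat) >>> (2 * n) = i >>> (2 * (n + 1)) := by
      rw [(Int.shiftRight_add i 2 (2*n)).symm]; congr 1; omega
    rw [h1, h2]
    congr 1
    ring

-- the heart: one outer step of A, seen through an orientation (swap, neg), equals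
-- B's mapped offset plus the composed orientation applied to the inner value.
theorem pv_key (swap neg : Bool) (s rx ry : Int)
    (hrx : rx = 0 ∨ rx = 1) (hry : ry = 0 ∨ ry = 1) (v : Int × Int) :
    pvApp swap neg (pvStepRaw s rx ry v) =
      (let o : Int × Int :=
        if ry = 1 then (s * rx, s)
        else if rx = 1 then (2 * s - 1, s - 1)
        else (0, 0)
       let o := if swap then (o.2, o.1) else o
       let o := if neg then (-o.1, -o.2) else o
       let w := pvApp (if ry = 0 then !swap else swap) (if ry = 0 then (neg != (rx == 1)) else neg) v
       (o.1 + w.1, o.2 + w.2)) := by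
  rcases hrx with h | h <;> rcases hry with h' | h' <;> subst h h' <;>
    cases swap <;> cases neg <;>
      simp [pvApp, pvStepRaw] <;> omega

-- B's loop invariant: starting from offset (x, y) and orientation (swap, neg),
-- the loop returns that offset plus the orientation applied to A's k-level result.
theorem pvB_inv (i : Int) (k : Nat) : ∀ (x y : Int) (swap neg : Bool),
    pvB_loop i x y swap neg k =
      (x + (pvApp swap neg (pvA_loop 0 0 i 1 k)).1,
       y + (pvApp swap neg (pvA_loop 0 0 i 1 k)).2) := by
  induction k with
  | zero =>
    intro x y swap neg
    cases swap <;> cases neg <;> simp [pvB_loop, pvA_loop, pvApp]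
  | succ k ih =>
    intro x y swap neg
    conv_lhs => rw [pvB_loop]
    rw [ih]
    rw [pvA_last k 0 0 i 1]
    rw [pv_key swap neg _ _ _ (pv_band_one_cases _) (pv_band_one_cases _)]
    have hone : ((1 <<< k : Nat) : Int) = 2 ^ k := by
      push_cast [Nat.shiftLeft_eq]; ring
    simp only [hone, one_mul, Prod.mk.injEq]
    constructor <;> ring

-- ===== VERDICT (by name: the statement is the Claim_ definition above) =====
theorem hilbert_index_to_xy_py_spec : Claim_equal_hilbert_index_to_xy_py := by
  intro index order _
  unfold Spec_hilbert_index_to_xy_py hilbert_index_to_xy_py hilbert_index_to_xy_py_alt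
  rw [pvB_inv]
  cases h : pvA_loop 0 0 index 1 order.toNat with
  | mk a b => simp [pvApp]
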